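-- pv_equiv track=rewrite | github.com/AzoeDesarrollos/MavisDB | backend/levenshtein.py | compare_by_lenght
-- ===== SOURCE A (Python) =====
-- def compare_by_lenght(item, palabras):
--     k = []
--     v = 0
--     for i, palabra in enumerate(palabras):
--         k.append([palabra, 0])
--         if len(palabra) < len(item):
--             a, b = palabra, item
--         else:
--             a, b = item, palabra
--
--         for j, letter in enumerate(a):
--             if b[j] == letter:
--                 k[i][1] += 1
--         if k[i][1] > v:
--             v = k[i][1]
--
--     f = []
--     for o in k:
--         if o[1] >= v:
--             f.append(o[0])
--
--     return f
-- ===== SOURCE B (Python) =====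
-- def compare_by_lenght(item, palabras):
--     best = -1
--     winners = []
--     for p in palabras:
--         score = sum(c1 == c2 for c1, c2 in zip(item, p))
--         if score > best:
--             best = score
--             winners = [p]
--         elif score == best:
--             winners.append(p)
--     return winners
-- ===== Notes on version B (the rewrite author's own statement) =====
-- stated objective: simpler
-- what changed: A builds a full (word, score) table while tracking the max and then runs a second filter pass over the table; B makes a single pass over palabras, scoring each word with one zip and maintaining only the running best score and the current winners list (reset on strict improvement, append on tie), so no score table and no second pass exist.
import Mathlib
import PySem

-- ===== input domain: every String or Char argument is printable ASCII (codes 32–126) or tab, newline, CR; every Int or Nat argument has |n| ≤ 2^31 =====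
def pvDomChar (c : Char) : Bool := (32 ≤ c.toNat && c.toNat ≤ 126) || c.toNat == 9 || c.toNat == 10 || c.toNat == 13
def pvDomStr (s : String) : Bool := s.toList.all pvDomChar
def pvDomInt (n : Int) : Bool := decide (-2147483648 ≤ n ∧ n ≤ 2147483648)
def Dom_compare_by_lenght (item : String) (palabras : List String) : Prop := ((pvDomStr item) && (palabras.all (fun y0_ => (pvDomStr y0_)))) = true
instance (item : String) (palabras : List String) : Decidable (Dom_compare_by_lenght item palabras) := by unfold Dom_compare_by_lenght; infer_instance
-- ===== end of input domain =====

-- B replaces A's two passes (score table + max, then a filter pass) by one pass that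
-- keeps the running best score and the current list of winners (objective: simpler).

-- ===== PORT A =====
-- inner loop: for j, letter in enumerate(a): if b[j] == letter: cnt += 1
def pvInnerA (a b : List Char) : Int :=
  (PySem.List.enumerate a 0).foldl
    (fun cnt jl => if PySem.List.pyGet? b jl.1 = some jl.2 then cnt + 1 else cnt) 0

def compare_by_lenght (item : String) (palabras : List String) : List String :=
  let kv := (PySem.List.enumerate palabras 0).foldl
    (fun st ip =>
      let palabra := ip.2
      let ab := if PySem.Str.len palabra < PySem.Str.len item then (palabra, item) else (item, palabra)
      let cnt := pvInnerA ab.1.toList ab.2.toList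
      let v' := if cnt > st.2 then cnt else st.2
      (st.1 ++ [(palabra, cnt)], v'))
    (([] : List (String × Int)), (0 : Int))
  kv.1.foldl (fun f o => if o.2 ≥ kv.2 then f ++ [o.1] else f) []

-- ===== PORT B =====
-- score = sum(c1 == c2 for c1, c2 in zip(item, p))
def pvScoreB (item p : String) : Int :=
  (item.toList.zip p.toList).foldl (fun acc cc => acc + (if cc.1 = cc.2 then 1 else 0)) 0

def compare_by_lenght_alt (item : String) (palabras : List String) : List String :=
  (palabras.foldl
    (fun st p =>
      let score := pvScoreB item p
      if score > st.1 then (score, [p])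
      else if score = st.1 then (st.1, st.2 ++ [p])
      else st)
    ((-1 : Int), ([] : List String))).2

-- ===== PRECONDITION & SPEC =====
def Spec_compare_by_lenght (item : String) (palabras : List String) (out : List String) : Prop := out = compare_by_lenght_alt item palabras
instance (item : String) (palabras : List String) (out : List String) : Decidable (Spec_compare_by_lenght item palabras out) := by unfold Spec_compare_by_lenght; infer_instance

-- ===== CLAIM (what is proved, stated in full; the proofs are below) =====
def Claim_equal_compare_by_lenght : Prop := ∀ (item : String) (palabras : List String), Dom_compare_by_lenght item palabras → Spec_compare_by_lenght item palabras (compare_by_lenght item palabras)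

-- ===== LEMMAS AND PROOFS =====

-- running maximum of the scores, as both loops maintain it
def pvRunMax (s : String → Int) (ps : List String) (v : Int) : Int :=
  ps.foldl (fun v p => if s p > v then s p else v) v

theorem pvRunMax_cons (s : String → Int) (p : String) (ps : List String) (v : Int) :
    pvRunMax s (p :: ps) v = pvRunMax s ps (if s p > v then s p else v) := rfl

theorem pvRunMax_eq_foldl_max (s : String → Int) (ps : List String) (v : Int) :
    pvRunMax s ps v = ps.foldl (fun v p => max v (s p)) v := by
  unfold pvRunMax
  congr 1
  funext v p
  rcases le_total (s p) v with h | h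
  · simp [not_lt.mpr h, max_eq_left h]
  · rcases eq_or_lt_of_le h with h' | h'
    · simp [h']
    · simp [h', le_of_lt h']

theorem le_pvRunMax (s : String → Int) (ps : List String) (v : Int) :
    v ≤ pvRunMax s ps v := by
  rw [pvRunMax_eq_foldl_max]
  exact (PySem.List.le_foldl_max_int ps s v).1

theorem mem_le_pvRunMax (s : String → Int) (ps : List String) (v : Int)
    {p : String} (hp : p ∈ ps) : s p ≤ pvRunMax s ps v := by
  rw [pvRunMax_eq_foldl_max]
  exact (PySem.List.le_foldl_max_int ps s v).2 p hp

-- scores are sums of 0/1 terms, hence nonnegative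
theorem pvScoreB_fold_le (l : List (Char × Char)) (acc : Int) :
    acc ≤ l.foldl (fun acc cc => acc + (if cc.1 = cc.2 then 1 else 0)) acc := by
  induction l generalizing acc with
  | nil => simp
  | cons c l ih =>
    simp only [List.foldl_cons]
    calc acc ≤ acc + (if c.1 = c.2 then 1 else 0) := by split <;> omega
      _ ≤ _ := by
        generalize acc + (if c.1 = c.2 then 1 else 0) = a
        -- the fold's accumulator is generic, reuse ih
        exact ih a

theorem pvScoreB_nonneg (item p : String) : 0 ≤ pvScoreB item p :=
  pvScoreB_fold_le _ 0

-- A's inner index loop counts exactly the aligned equal pairs of the zip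
theorem pvInnerA_gen (a : List Char) : ∀ (b pre : List Char) (acc : Int),
    a.length ≤ b.length →
    (PySem.List.enumerate a (pre.length : Int)).foldl
        (fun cnt jl => if PySem.List.pyGet? (pre ++ b) jl.1 = some jl.2 then cnt + 1 else cnt) acc
      = (a.zip b).foldl (fun acc cc => acc + (if cc.1 = cc.2 then 1 else 0)) acc := by
  induction a with
  | nil => intro b pre acc _; simp [PySem.List.enumerate_nil]
  | cons x a ih =>
    intro b pre acc hlen
    cases b with
    | nil => simp at hlen
    | cons c b =>
      rw [PySem.List.enumerate_cons]
      simp only [List.foldl_cons, List.zip_cons_cons]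
      have hget : PySem.List.pyGet? (pre ++ c :: b) (pre.length : Int) = some c :=
        PySem.List.pyGet?_append_length pre b c
      rw [hget]
      have hcast : ((pre.length : Int) + 1) = ((pre ++ [c]).length : Int) := by
        simp
      have hb : pre ++ c :: b = (pre ++ [c]) ++ b := by simp
      rw [hcast, hb]
      have := ih b (pre ++ [c]) (if some c = some x then acc + 1 else acc) (by simpa using hlen)
      rw [this]
      by_cases hxc : x = c
      · simp [hxc]
      · have hcx : ¬ c = x := fun hh => hxc hh.symm
        simp [hxc, hcx]

theorem pvInnerA_eq (a b : List Char) (h : a.length ≤ b.length) :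
    pvInnerA a b = (a.zip b).foldl (fun acc cc => acc + (if cc.1 = cc.2 then 1 else 0)) 0 := by
  have := pvInnerA_gen a b [] 0 h
  simpa [pvInnerA] using this

-- the zip count is symmetric in its two lists
theorem zip_count_comm (a b : List Char) :
    (a.zip b).foldl (fun acc cc => acc + (if cc.1 = cc.2 then 1 else 0)) (0 : Int)
      = (b.zip a).foldl (fun acc cc => acc + (if cc.1 = cc.2 then 1 else 0)) (0 : Int) := by
  rw [← List.zip_swap b a, List.foldl_map]
  congr 1
  funext acc cc
  simp [Prod.swap, eq_comm]

-- A's per-word count is B's score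
theorem countA_eq_score (item palabra : String) :
    pvInnerA (if PySem.Str.len palabra < PySem.Str.len item then (palabra, item) else (item, palabra)).1.toList
             (if PySem.Str.len palabra < PySem.Str.len item then (palabra, item) else (item, palabra)).2.toList
      = pvScoreB item palabra := by
  unfold pvScoreB
  by_cases h : PySem.Str.len palabra < PySem.Str.len item
  · have hlen : palabra.toList.length ≤ item.toList.length := by
      simp only [PySem.Str.len_eq, String.length_toList] at h ⊢
      omega
    simp only [h, if_true]
    rw [pvInnerA_eq _ _ hlen]
    exact zip_count_comm palabra.toList item.toList
  · have hlen : item.toList.length ≤ palabra.toList.length := by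
      simp only [PySem.Str.len_eq, String.length_toList] at h ⊢
      omega
    simp only [h, if_false]
    rw [pvInnerA_eq _ _ hlen]

-- A's first loop: builds the score table and the running max
theorem A_fold (item : String) (ps : List String) : ∀ (n : Int) (k : List (String × Int)) (v : Int),
    (PySem.List.enumerate ps n).foldl
      (fun st ip =>
        let palabra := ip.2
        let ab := if PySem.Str.len palabra < PySem.Str.len item then (palabra, item) else (item, palabra)
        let cnt := pvInnerA ab.1.toList ab.2.toList
        let v' := if cnt > st.2 then cnt else st.2
        (st.1 ++ [(palabra, cnt)], v'))
      (k, v)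
      = (k ++ ps.map (fun p => (p, pvScoreB item p)), pvRunMax (pvScoreB item) ps v) := by
  induction ps with
  | nil => intro n k v; simp [PySem.List.enumerate_nil, pvRunMax]
  | cons p ps ih =>
    intro n k v
    rw [PySem.List.enumerate_cons]
    simp only [List.foldl_cons, List.map_cons]
    rw [ih, countA_eq_score, pvRunMax_cons]
    simp

-- A's second loop: filter of the table by the max
theorem A_filter (v : Int) (item : String) (ps : List String) :
    (ps.map (fun p => (p, pvScoreB item p))).foldl
        (fun f o => if o.2 ≥ v then f ++ [o.1] else f) ([] : List String)
      = ps.filter (fun p => decide (v ≤ pvScoreB item p)) := by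
  induction ps using List.reverseRecOn with
  | nil => simp
  | append_singleton ps p ih =>
    simp only [List.map_append, List.foldl_append, List.map_cons, List.map_nil,
      List.foldl_cons, List.foldl_nil, List.filter_append, ih, List.filter_cons, List.filter_nil]
    by_cases h : v ≤ pvScoreB item p
    · simp [h, ge_iff_le]
    · simp [h, ge_iff_le]

-- characterisation of A
theorem A_char (item : String) (ps : List String) :
    compare_by_lenght item ps
      = ps.filter (fun p => decide (pvRunMax (pvScoreB item) ps 0 ≤ pvScoreB item p)) := by
  unfold compare_by_lenght
  rw [A_fold item ps 0 [] 0]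
  simpa using A_filter (pvRunMax (pvScoreB item) ps 0) item ps

-- characterisation of B's single pass
theorem B_fold (item : String) (ps : List String) : ∀ (best : Int) (ws : List String),
    ps.foldl
      (fun st p =>
        let score := pvScoreB item p
        if score > st.1 then (score, [p])
        else if score = st.1 then (st.1, st.2 ++ [p])
        else st)
      (best, ws)
      = (pvRunMax (pvScoreB item) ps best,
         if pvRunMax (pvScoreB item) ps best = best
         then ws ++ ps.filter (fun p => decide (pvScoreB item p = best))
         else ps.filter (fun p => decide (pvScoreB item p = pvRunMax (pvScoreB item) ps best))) := by
  induction ps with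
  | nil => intro best ws; simp [pvRunMax]
  | cons p ps ih =>
    intro best ws
    simp only [List.foldl_cons, pvRunMax_cons]
    set s := pvScoreB item with hs
    rcases lt_trichotomy best (s p) with h | h | h
    · -- strict improvement: reset winners
      simp only [gt_iff_lt, h, if_true, ih (s p) [p]]
      have hge : s p ≤ pvRunMax s ps (s p) := le_pvRunMax s ps (s p)
      have hne : pvRunMax s ps (s p) ≠ best := by omega
      rw [if_neg hne]
      by_cases hm : pvRunMax s ps (s p) = s p
      · simp [hm]
      · have : s p ≠ pvRunMax s ps (s p) := fun hc => hm hc.symm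
        simp [hm, this]
    · -- tie: append
      subst h
      have h1 : ¬ s p > s p := lt_irrefl _
      rw [if_neg h1, if_pos rfl, ih (s p) (ws ++ [p])]
      by_cases hm : pvRunMax s ps (s p) = s p
      · simp [hm]
      · have hne : ¬ (s p = pvRunMax s ps (s p)) := fun hc => hm hc.symm
        simp [hm, hne]
    · -- worse: state unchanged
      have h1 : ¬ s p > best := by omega
      have h2 : s p ≠ best := by omega
      simp only [gt_iff_lt, h1, if_false, h2, ih best ws]
      have hge : best ≤ pvRunMax s ps best := le_pvRunMax s ps best
      by_cases hm : pvRunMax s ps best = best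
      · simp [hm, h2]
      · have : s p ≠ pvRunMax s ps best := by omega
        simp [hm, this]

-- ===== VERDICT (by name: the statement is the Claim_ definition above) =====
theorem compare_by_lenght_spec : Claim_equal_compare_by_lenght := by
  intro item ps _
  unfold Spec_compare_by_lenght
  rw [A_char]
  unfold compare_by_lenght_alt
  rw [B_fold item ps (-1) []]
  set s := pvScoreB item with hs
  cases ps with
  | nil => simp
  | cons q rest =>
    have hq : (0 : Int) ≤ s q := pvScoreB_nonneg item q
    -- the two running maxima agree: first step absorbs both inits
    have hM : pvRunMax s (q :: rest) (-1) = pvRunMax s (q :: rest) 0 := by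
      rw [pvRunMax_cons, pvRunMax_cons]
      have h1 : s q > (-1 : Int) := by omega
      rw [if_pos h1]
      by_cases h0 : s q > (0 : Int)
      · rw [if_pos h0]
      · have : s q = 0 := by omega
        rw [if_neg h0, this]
    have hge : s q ≤ pvRunMax s (q :: rest) (-1) := mem_le_pvRunMax s _ _ (List.mem_cons_self)
    have hne : pvRunMax s (q :: rest) (-1) ≠ -1 := by omega
    rw [if_neg hne, hM]
    simp only
    apply (List.filter_congr _).symm
    intro p hp
    have hle : s p ≤ pvRunMax s (q :: rest) 0 := mem_le_pvRunMax s _ _ hp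
    by_cases h : s p = pvRunMax s (q :: rest) 0
    · simp [h]
    · have hlt : s p < pvRunMax s (q :: rest) 0 := lt_of_le_of_ne hle h
      simp [h, not_le.mpr hlt]
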